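-- pv_equiv track=rewrite | github.com/pascalwhoop/convx | src/convx_ai/sanitize.py | sanitize_lines
-- ===== SOURCE A (Python) =====
-- SANITIZED = "[SANITIZED]"
--
-- def sanitize_lines(text: str, keywords: list[str]) -> str:
--     """Replace any line containing a keyword (case-insensitive) with [SANITIZED]."""
--     if not keywords:
--         return text
--     lower_keywords = [k.lower() for k in keywords]
--     lines = text.split("\n")
--     result = []
--     for line in lines:
--         if any(kw in line.lower() for kw in lower_keywords):
--             result.append(SANITIZED)
--         else:
--             result.append(line)
--     return "\n".join(result)
-- ===== SOURCE B (Python) =====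
-- SANITIZED = "[SANITIZED]"
--
-- def sanitize_lines(text: str, keywords: list[str]) -> str:
--     """Replace any line containing a keyword (case-insensitive) with [SANITIZED].
--
--     Single streaming pass over the characters: a keyword hit is detected
--     incrementally (suffix check on the lowered line so far as each character
--     arrives); the line is flushed on newline. No split()/re-lowering per line.
--     """
--     lows = tuple(k.lower() for k in keywords)
--     empty_hit = "" in lows
--     pieces = []
--     line = []
--     low = ""
--     dirty = empty_hit
--     for ch in text:
--         if ch == "\n":
--             pieces.append(SANITIZED if dirty else "".join(line))
--             line = []
--             low = ""
--             dirty = empty_hit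
--         else:
--             line.append(ch)
--             low += ch.lower()
--             if not dirty:
--                 dirty = low.endswith(lows)
--     pieces.append(SANITIZED if dirty else "".join(line))
--     return "\n".join(pieces)
-- ===== Notes on version B (the rewrite author's own statement) =====
-- stated objective: alternative
-- what changed: B replaces A's split-into-lines / per-line substring-membership passes by one streaming pass over the characters: it maintains the current line, its lowered form and a hit flag, detects keyword hits incrementally via a suffix check on the lowered prefix as each character arrives, and flushes the line (or the sentinel) at each newline.
import Mathlib
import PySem

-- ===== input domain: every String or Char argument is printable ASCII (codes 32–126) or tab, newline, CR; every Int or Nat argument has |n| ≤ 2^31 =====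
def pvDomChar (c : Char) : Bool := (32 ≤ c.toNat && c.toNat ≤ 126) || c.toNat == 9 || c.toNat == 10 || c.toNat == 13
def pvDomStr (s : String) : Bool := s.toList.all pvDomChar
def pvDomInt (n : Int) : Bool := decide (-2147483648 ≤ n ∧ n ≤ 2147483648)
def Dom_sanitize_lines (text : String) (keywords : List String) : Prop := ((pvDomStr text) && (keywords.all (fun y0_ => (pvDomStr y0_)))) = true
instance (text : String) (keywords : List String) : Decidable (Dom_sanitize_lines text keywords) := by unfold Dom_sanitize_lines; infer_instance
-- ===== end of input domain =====

-- B replaces A's split-into-lines / per-line substring-membership passes by one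
-- streaming pass over the characters, detecting keyword hits incrementally via a
-- suffix check on the lowered line built so far. Objective: alternative.

-- ===== PORT A =====
def sanitize_lines (text : String) (keywords : List String) : String :=
  if keywords = [] then text
  else
    let lower_keywords := keywords.map (fun k => PySem.Chars.lower k.toList)
    let lines := PySem.Chars.splitOn text.toList ['\n']
    let result := lines.foldl (fun acc line =>
      if lower_keywords.any (fun kw => PySem.Chars.isIn kw (PySem.Chars.lower line))
      then acc ++ ["[SANITIZED]".toList]
      else acc ++ [line]) []
    String.ofList (PySem.Chars.join ['\n'] result)

-- ===== PORT B =====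
def sanitize_lines_alt (text : String) (keywords : List String) : String :=
  let lows := keywords.map (fun k => PySem.Chars.lower k.toList)
  let emptyHit := lows.contains ([] : List Char)
  let st := text.toList.foldl
    (fun (s : List (List Char) × List Char × List Char × Bool) ch =>
      if ch = '\n' then
        (s.1 ++ [if s.2.2.2 then "[SANITIZED]".toList else s.2.1], [], [], emptyHit)
      else
        let low' := s.2.2.1 ++ [PySem.Chars.lowerChar ch]
        (s.1, s.2.1 ++ [ch], low',
          if s.2.2.2 then true else lows.any (fun kw => PySem.Chars.endswith low' kw)))
    ([], [], [], emptyHit)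
  String.ofList (PySem.Chars.join ['\n']
    (st.1 ++ [if st.2.2.2 then "[SANITIZED]".toList else st.2.1]))

-- ===== PRECONDITION & SPEC =====
def Spec_sanitize_lines (text : String) (keywords : List String) (out : String) : Prop := out = sanitize_lines_alt text keywords
instance (text : String) (keywords : List String) (out : String) : Decidable (Spec_sanitize_lines text keywords out) := by unfold Spec_sanitize_lines; infer_instance

-- ===== CLAIM (what is proved, stated in full; the proofs are below) =====
def Claim_equal_sanitize_lines : Prop := ∀ (text : String) (keywords : List String), Dom_sanitize_lines text keywords → Spec_sanitize_lines text keywords (sanitize_lines text keywords)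

-- ===== LEMMAS AND PROOFS =====

-- splitc c l = l.split at each occurrence of c (reference shape of Python str.split("\n"))
def splitc (c : Char) : List Char → List (List Char)
  | [] => [[]]
  | a :: t =>
    let r := splitc c t
    if a = c then [] :: r else (a :: r.headI) :: r.tail

theorem splitc_ne_nil (c : Char) (l : List Char) : splitc c l ≠ [] := by
  cases l with
  | nil => simp [splitc]
  | cons a t =>
    simp only [splitc]
    split <;> simp

theorem splitOn_go_eq (c : Char) (l : List Char) : ∀ (fuel : Nat) (cur h : List Char)
    (acc r : List (List Char)), l.length ≤ fuel → splitc c l = h :: r →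
    PySem.Chars.splitOn.go [c] fuel l cur acc = acc.reverse ++ (cur.reverse ++ h) :: r := by
  induction l with
  | nil =>
    intro fuel cur h acc r _ hs
    simp [splitc] at hs
    cases fuel <;>
      simp [PySem.Chars.splitOn.go.eq_def, hs.1, hs.2]
  | cons a t ih =>
    intro fuel cur h acc r hf hs
    cases fuel with
    | zero => simp at hf
    | succ fuel =>
      simp only [splitc] at hs
      rcases hh : splitc c t with _ | ⟨h', r'⟩
      · exact absurd hh (splitc_ne_nil c t)
      rw [hh] at hs
      simp only [List.headI, List.tail] at hs
      have hflen : t.length ≤ fuel := by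
        simpa using Nat.lt_succ_iff.mp (by simpa using hf)
      by_cases hac : a = c
      · simp only [if_pos hac] at hs
        rw [PySem.Chars.splitOn.go.eq_def]
        simp only []
        have hpre : List.isPrefixOf [c] (a :: t) = true := by
          simp [List.isPrefixOf, hac]
        rw [if_pos hpre]
        simp only [List.length_cons, List.length_nil, List.drop_succ_cons, List.drop_zero]
        rw [ih fuel [] h' (cur.reverse :: acc) r' hflen hh]
        injection hs with hs1 hs2
        rw [← hs1, ← hs2]
        simp
      · simp only [if_neg hac] at hs
        rw [PySem.Chars.splitOn.go.eq_def]
        simp only []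
        have hpre : List.isPrefixOf [c] (a :: t) = false := by
          simp [List.isPrefixOf]
          intro hc; exact absurd hc.symm hac
        rw [if_neg (by simp [hpre])]
        rw [ih fuel (a :: cur) h' acc r' hflen hh]
        injection hs with hs1 hs2
        rw [← hs1, ← hs2]
        simp

theorem splitOn_eq_splitc (c : Char) (l : List Char) :
    PySem.Chars.splitOn l [c] = splitc c l := by
  rcases hh : splitc c l with _ | ⟨h, r⟩
  · exact absurd hh (splitc_ne_nil c l)
  rw [PySem.Chars.splitOn, splitOn_go_eq c l (l.length + 1) [] h [] r (by omega) hh]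
  simp

theorem join_splitc (c : Char) (l : List Char) :
    PySem.Chars.join [c] (splitc c l) = l := by
  induction l with
  | nil => simp [splitc, PySem.Chars.join_singleton]
  | cons a t ih =>
    simp only [splitc]
    rcases hh : splitc c t with _ | ⟨h, r⟩
    · exact absurd hh (splitc_ne_nil c t)
    rw [hh] at ih
    by_cases hac : a = c
    · rw [if_pos hac, PySem.Chars.join_cons_cons, ih, hac]
      simp
    · rw [if_neg hac]
      simp only [List.headI, List.tail]
      cases r with
      | nil =>
        rw [PySem.Chars.join_singleton] at ih ⊢
        rw [ih]
      | cons q r' =>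
        rw [PySem.Chars.join_cons_cons] at ih ⊢
        rw [List.cons_append, List.cons_append, ih]

-- the sanitized form of one line (shared characterisation of both programs)
def sanLine (lows : List (List Char)) (line : List Char) : List Char :=
  if lows.any (fun kw => PySem.Chars.isIn kw (PySem.Chars.lower line))
  then "[SANITIZED]".toList else line

-- B's final flush of the fold state
def flushB (st : List (List Char) × List Char × List Char × Bool) : List (List Char) :=
  st.1 ++ [if st.2.2.2 then "[SANITIZED]".toList else st.2.1]

theorem infix_snoc (kw l : List Char) (c : Char) :
    kw <:+: (l ++ [c]) ↔ kw <:+: l ∨ kw <:+ (l ++ [c]) := by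
  constructor
  · rintro ⟨s, t, h⟩
    rcases t.eq_nil_or_concat with rfl | ⟨t', c', rfl⟩
    · right
      exact ⟨s, by simpa using h⟩
    · left
      have h2 : (s ++ kw ++ t') ++ [c'] = l ++ [c] := by
        simpa [List.concat_eq_append, List.append_assoc] using h
      exact ⟨s, t', (List.append_inj' h2 (by simp)).1⟩
  · rintro (h | h)
    · exact h.trans (List.prefix_append l [c]).isInfix
    · exact h.isInfix

theorem isIn_snoc (kw low : List Char) (c : Char) :
    PySem.Chars.isIn kw (low ++ [c])
      = (PySem.Chars.isIn kw low || PySem.Chars.endswith (low ++ [c]) kw) := by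
  rw [Bool.eq_iff_iff, Bool.or_eq_true, PySem.Chars.isIn_iff_infix, PySem.Chars.isIn_iff_infix,
    PySem.Chars.endswith_iff]
  exact infix_snoc kw low c

theorem any_isIn_nil (lows : List (List Char)) :
    lows.any (fun kw => PySem.Chars.isIn kw []) = lows.contains ([] : List Char) := by
  rw [Bool.eq_iff_iff, List.any_eq_true, List.contains_iff_mem]
  constructor
  · rintro ⟨kw, hkw, h⟩
    rw [PySem.Chars.isIn_iff_infix, List.infix_nil] at h
    exact h ▸ hkw
  · intro h
    exact ⟨[], h, by rw [PySem.Chars.isIn_iff_infix]⟩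

theorem dirty_step (lows : List (List Char)) (low : List Char) (c : Char) :
    (if lows.any (fun kw => PySem.Chars.isIn kw low) then true
     else lows.any (fun kw => PySem.Chars.endswith (low ++ [c]) kw))
    = lows.any (fun kw => PySem.Chars.isIn kw (low ++ [c])) := by
  have h : lows.any (fun kw => PySem.Chars.isIn kw (low ++ [c]))
      = (lows.any (fun kw => PySem.Chars.isIn kw low)
         || lows.any (fun kw => PySem.Chars.endswith (low ++ [c]) kw)) := by
    rw [Bool.eq_iff_iff, Bool.or_eq_true, List.any_eq_true, List.any_eq_true, List.any_eq_true]
    constructor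
    · rintro ⟨kw, hkw, h⟩
      rw [isIn_snoc, Bool.or_eq_true] at h
      exact h.elim (fun h => Or.inl ⟨kw, hkw, h⟩) (fun h => Or.inr ⟨kw, hkw, h⟩)
    · rintro (⟨kw, hkw, h⟩ | ⟨kw, hkw, h⟩) <;>
        exact ⟨kw, hkw, by rw [isIn_snoc]; simp [h]⟩
  rw [h]
  cases lows.any (fun kw => PySem.Chars.isIn kw low) <;> simp

-- the single-pass fold of B produces exactly the per-line sanitization of A
theorem foldB_eq (lows : List (List Char)) (l : List Char) :
    ∀ (pieces : List (List Char)) (line lw : List Char) (d : Bool),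
    lw = PySem.Chars.lower line →
    d = lows.any (fun kw => PySem.Chars.isIn kw lw) →
    flushB
      (l.foldl
        (fun (s : List (List Char) × List Char × List Char × Bool) ch =>
          if ch = '\n' then
            (s.1 ++ [if s.2.2.2 then "[SANITIZED]".toList else s.2.1], [], [],
              lows.contains ([] : List Char))
          else
            (s.1, s.2.1 ++ [ch], s.2.2.1 ++ [PySem.Chars.lowerChar ch],
              if s.2.2.2 then true
              else lows.any (fun kw =>
                PySem.Chars.endswith (s.2.2.1 ++ [PySem.Chars.lowerChar ch]) kw)))
        (pieces, line, lw, d))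
    = pieces ++ sanLine lows (line ++ (splitc '\n' l).headI)
        :: ((splitc '\n' l).tail.map (sanLine lows)) := by
  induction l with
  | nil =>
    intro pieces line lw d hlw hd
    subst hlw
    subst hd
    simp [splitc, flushB, sanLine]
  | cons c t ih =>
    intro pieces line lw d hlw hd
    rcases hh : splitc '\n' t with _ | ⟨h, r⟩
    · exact absurd hh (splitc_ne_nil _ _)
    simp only [List.foldl_cons]
    by_cases hc : c = '\n'
    · subst hc
      rw [if_pos rfl]
      rw [ih (pieces ++ [if d then "[SANITIZED]".toList else line]) [] []
        (lows.contains ([] : List Char)) (by simp [PySem.Chars.lower])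
        (by rw [← any_isIn_nil lows])]
      have hflush : (if d then "[SANITIZED]".toList else line) = sanLine lows line := by
        subst hlw; subst hd; rfl
      simp only [splitc, hh, List.headI, List.tail, hflush]
      simp
    · rw [if_neg hc]
      rw [ih pieces (line ++ [c]) (lw ++ [PySem.Chars.lowerChar c])
        (if d then true
         else lows.any (fun kw =>
           PySem.Chars.endswith (lw ++ [PySem.Chars.lowerChar c]) kw))
        (by subst hlw; simp [PySem.Chars.lower])
        (by subst hlw; subst hd;
            exact (dirty_step lows (PySem.Chars.lower line) (PySem.Chars.lowerChar c)).symm ▸ rfl)]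
      simp only [splitc, if_neg hc, hh, List.headI, List.tail]
      rw [List.append_assoc]
      simp

-- ===== VERDICT (by name: the statement is the Claim_ definition above) =====
theorem sanitize_lines_spec : Claim_equal_sanitize_lines := by
  intro text keywords _
  unfold Spec_sanitize_lines sanitize_lines sanitize_lines_alt
  dsimp only
  rw [show ∀ st : List (List Char) × List Char × List Char × Bool,
      st.1 ++ [if st.2.2.2 then "[SANITIZED]".toList else st.2.1] = flushB st
      from fun _ => rfl]
  rw [foldB_eq (keywords.map (fun k => PySem.Chars.lower k.toList)) text.toList [] [] []
    ((keywords.map (fun k => PySem.Chars.lower k.toList)).contains ([] : List Char))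
    (by simp [PySem.Chars.lower]) (by rw [← any_isIn_nil])]
  have hmap : sanLine (keywords.map (fun k => PySem.Chars.lower k.toList))
        ([] ++ (splitc '\n' text.toList).headI)
        :: ((splitc '\n' text.toList).tail.map
            (sanLine (keywords.map (fun k => PySem.Chars.lower k.toList))))
      = (splitc '\n' text.toList).map
          (sanLine (keywords.map (fun k => PySem.Chars.lower k.toList))) := by
    rcases hh : splitc '\n' text.toList with _ | ⟨h, r⟩
    · exact absurd hh (splitc_ne_nil _ _)
    simp [List.headI, List.tail]
  rw [List.nil_append, hmap]
  by_cases hk : keywords = []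
  · subst hk
    rw [if_pos rfl]
    have h1 : sanLine [] = id := by
      funext x
      simp [sanLine]
    rw [List.map_nil, h1, List.map_id, join_splitc]
    exact String.ofList_toList.symm
  · rw [if_neg hk, splitOn_eq_splitc]
    have hfold : ∀ (xs : List (List Char)) (init : List (List Char)),
        xs.foldl (fun acc line =>
          if (keywords.map (fun k => PySem.Chars.lower k.toList)).any
              (fun kw => PySem.Chars.isIn kw (PySem.Chars.lower line))
          then acc ++ ["[SANITIZED]".toList] else acc ++ [line]) init
        = init ++ xs.map (sanLine (keywords.map (fun k => PySem.Chars.lower k.toList))) := by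
      intro xs
      induction xs with
      | nil => intro init; simp
      | cons x t ih =>
        intro init
        simp only [List.foldl_cons, List.map_cons]
        rw [ih]
        unfold sanLine
        split <;> simp
    rw [hfold]
    simp
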